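-- pv_equiv track=rewrite | github.com/prestigeworldwidecr/CodeSignal | commonCharacterCount/common_character_count.py | solution
-- ===== SOURCE A (Python) =====
-- def solution(s1, s2) :
-- # {
--
--     t = 0
--
--     for i in set(s1) :
--     # {
--         for j in set(s2) :
--         # {
--             if (i == j) :
--             # {
--                 t = t + min(s1.count(i), s2.count(j))
--             # }
--
--             else :
--             # {
--                 None
--             # }
--
--         # }
--
--     # }
--
--     return t
-- ===== SOURCE B (Python) =====
-- def solution(s1, s2):
--     # One pass: count s2's characters, then consume them while scanning s1.
--     cnt = {}
--     for c in s2: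
--         cnt[c] = cnt.get(c, 0) + 1
--     t = 0
--     for c in s1:
--         if cnt.get(c, 0) > 0:
--             cnt[c] = cnt[c] - 1
--             t = t + 1
--     return t
-- ===== Notes on version B (the rewrite author's own statement) =====
-- stated objective: alternative
-- what changed: A's nested loop over set(s1)*set(s2) with repeated str.count scans is replaced by one counting pass over s2 (a dict) and one consuming pass over s1 that decrements counts.
import Mathlib
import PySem

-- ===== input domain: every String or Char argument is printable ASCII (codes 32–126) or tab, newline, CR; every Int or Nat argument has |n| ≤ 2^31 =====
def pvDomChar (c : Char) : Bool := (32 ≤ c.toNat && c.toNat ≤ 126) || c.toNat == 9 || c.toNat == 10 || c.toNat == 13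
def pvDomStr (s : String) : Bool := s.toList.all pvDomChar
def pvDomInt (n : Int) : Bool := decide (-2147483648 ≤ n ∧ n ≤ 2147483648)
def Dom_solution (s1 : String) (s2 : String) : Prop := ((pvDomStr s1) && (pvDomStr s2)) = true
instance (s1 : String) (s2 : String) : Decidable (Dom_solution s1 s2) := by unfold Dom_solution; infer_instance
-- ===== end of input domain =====

-- B replaces A's nested distinct-character scan (with repeated str.count passes) by one counting pass over s2 and one consuming pass over s1 (objective: alternative).

-- ===== PORT A =====
-- for i in set(s1): for j in set(s2): if i == j: t += min(s1.count(i), s2.count(j))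
def solution (s1 : String) (s2 : String) : Int :=
  (PySem.Set.ofList s1.toList).foldl (fun t i =>
    (PySem.Set.ofList s2.toList).foldl (fun t' j =>
      if i == j then t' + min ((s1.toList.count i : Int)) ((s2.toList.count j : Int)) else t') t) 0

-- ===== PORT B =====
-- cnt = counts of s2's chars; scan s1 consuming from cnt, counting consumed chars
def solution_alt (s1 : String) (s2 : String) : Int :=
  let cnt := s2.toList.foldl (fun d c => d.insert c (d.getD c 0 + 1)) (PySem.Dict.empty : PySem.Dict Char Int)
  (s1.toList.foldl (fun (p : Int × PySem.Dict Char Int) c =>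
      if p.2.getD c 0 > 0 then (p.1 + 1, p.2.insert c (p.2.getD c 0 - 1)) else p) (0, cnt)).1

-- ===== PRECONDITION & SPEC =====
def Spec_solution (s1 : String) (s2 : String) (out : Int) : Prop := out = solution_alt s1 s2
instance (s1 : String) (s2 : String) (out : Int) : Decidable (Spec_solution s1 s2 out) := by unfold Spec_solution; infer_instance

-- ===== CLAIM (what is proved, stated in full; the proofs are below) =====
def Claim_equal_solution : Prop := ∀ (s1 : String) (s2 : String), Dom_solution s1 s2 → Spec_solution s1 s2 (solution s1 s2)

-- ===== LEMMAS AND PROOFS =====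

-- A's inner loop over a duplicate-free list adds m i once iff i occurs in it
lemma pv_inner_fold (m : Char → Int) (i : Char) (L : List Char) (hnd : L.Nodup) (t : Int) :
    L.foldl (fun t' j => if i == j then t' + m j else t') t
      = t + (if i ∈ L then m i else 0) := by
  induction L generalizing t with
  | nil => simp
  | cons j L' ih =>
    rcases List.nodup_cons.mp hnd with ⟨hj, hnd'⟩
    by_cases h : i = j
    · subst h
      simp only [List.foldl_cons, beq_self_eq_true, if_pos]
      rw [ih hnd']
      simp [hj]
    · have : (i == j) = false := by simp [h]
      simp only [List.foldl_cons, this, Bool.false_eq_true, if_false]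
      rw [ih hnd']
      simp [h]

lemma pv_outer_fold (g : Char → Int) (L : List Char) (a : Int) :
    L.foldl (fun t i => t + g i) a = a + (L.map g).sum := by
  induction L generalizing a with
  | nil => simp
  | cons x L' ih => simp [ih]; ring

lemma pv_toFinset_ofList (l : List Char) :
    (PySem.Set.ofList l).toFinset = l.toFinset := by
  ext x
  simp [← PySem.List.dedup_eq_ofList, PySem.List.mem_dedup]

-- A computes the sum over s1's distinct characters of min(count₁, count₂)
lemma pv_solution_eq (s1 s2 : String) :
    solution s1 s2
      = ∑ i ∈ s1.toList.toFinset,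
          min ((s1.toList.count i : Int)) ((s2.toList.count i : Int)) := by
  unfold solution
  have hnd2 : (PySem.Set.ofList s2.toList).Nodup := by
    rw [← PySem.List.dedup_eq_ofList]; exact PySem.List.nodup_dedup _
  have hcongr :
      (PySem.Set.ofList s1.toList).foldl (fun t i =>
        (PySem.Set.ofList s2.toList).foldl (fun t' j =>
          if i == j then t' + min ((s1.toList.count i : Int)) ((s2.toList.count j : Int)) else t') t) 0
      = (PySem.Set.ofList s1.toList).foldl (fun t i =>
          t + (if i ∈ PySem.Set.ofList s2.toList then
                 min ((s1.toList.count i : Int)) ((s2.toList.count i : Int)) else 0)) 0 := by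
    apply PySem.List.foldl_congr_mem
    intro t i _
    exact pv_inner_fold _ i _ hnd2 t
  rw [hcongr, pv_outer_fold]
  have hnd1 : (PySem.Set.ofList s1.toList).Nodup := by
    rw [← PySem.List.dedup_eq_ofList]; exact PySem.List.nodup_dedup _
  rw [← List.sum_toFinset _ hnd1, pv_toFinset_ofList]
  rw [zero_add]
  apply Finset.sum_congr rfl
  intro i hi
  by_cases h2 : i ∈ PySem.Set.ofList s2.toList
  · simp [h2]
  · have : i ∉ s2.toList := by
      intro hmem
      exact h2 (by rw [← PySem.List.dedup_eq_ofList]; exact (PySem.List.mem_dedup _ _).mpr hmem)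
    have hc2 : s2.toList.count i = 0 := List.count_eq_zero.mpr this
    have hc1 : (0:Int) ≤ (s1.toList.count i : Int) := Int.natCast_nonneg _
    simp [h2, hc2]

-- B's consuming pass, abstracted over the running dict
lemma pv_alt_fold (l : List Char) (d : PySem.Dict Char Int) (t : Int) :
    (l.foldl (fun (p : Int × PySem.Dict Char Int) c =>
        if p.2.getD c 0 > 0 then (p.1 + 1, p.2.insert c (p.2.getD c 0 - 1)) else p) (t, d)).1
      = t + ∑ i ∈ l.toFinset, min ((l.count i : Int)) (max (d.getD i 0) 0) := by
  induction l generalizing d t with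
  | nil => simp
  | cons c cs ih =>
    simp only [List.foldl_cons, List.toFinset_cons]
    by_cases hpos : d.getD c 0 > 0
    · simp only [hpos, if_pos]
      rw [ih]
      have hterm : ∀ i ∈ cs.toFinset, i ≠ c →
          min ((cs.count i : Int)) (max ((d.insert c (d.getD c 0 - 1)).getD i 0) 0)
            = min (((c :: cs).count i : Int)) (max (d.getD i 0) 0) := by
        intro i _ hne
        rw [PySem.Dict.getD_insert, if_neg hne]
        simp [Ne.symm hne]
      by_cases hc : c ∈ cs.toFinset
      · rw [Finset.insert_eq_self.mpr hc]
        rw [← Finset.add_sum_erase _ _ hc, ← Finset.add_sum_erase _ _ hc]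
        have hsum : ∑ i ∈ cs.toFinset.erase c,
            min ((cs.count i : Int)) (max ((d.insert c (d.getD c 0 - 1)).getD i 0) 0)
          = ∑ i ∈ cs.toFinset.erase c,
            min (((c :: cs).count i : Int)) (max (d.getD i 0) 0) := by
          apply Finset.sum_congr rfl
          intro i hi
          exact hterm i (Finset.mem_of_mem_erase hi) (Finset.ne_of_mem_erase hi)
        rw [hsum]
        have hcterm :
            (1 : Int) + min ((cs.count c : Int)) (max ((d.insert c (d.getD c 0 - 1)).getD c 0) 0)
              = min (((c :: cs).count c : Int)) (max (d.getD c 0) 0) := by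
          rw [PySem.Dict.getD_insert, if_pos rfl]
          simp only [List.count_cons_self]
          push_cast
          omega
        omega
      · rw [Finset.sum_insert hc]
        have hc' : c ∉ cs := fun h => hc (List.mem_toFinset.mpr h)
        have hcnt : cs.count c = 0 := List.count_eq_zero.mpr hc'
        have hsum : ∑ i ∈ cs.toFinset,
            min ((cs.count i : Int)) (max ((d.insert c (d.getD c 0 - 1)).getD i 0) 0)
          = ∑ i ∈ cs.toFinset,
            min (((c :: cs).count i : Int)) (max (d.getD i 0) 0) := by
          apply Finset.sum_congr rfl
          intro i hi
          exact hterm i hi (fun h => hc (h ▸ hi))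
        rw [hsum]
        have : min (((c :: cs).count c : Int)) (max (d.getD c 0) 0) = 1 := by
          rw [List.count_cons_self, hcnt]
          push_cast
          omega
        omega
    · simp only [hpos, if_false]
      rw [ih]
      have hle : d.getD c 0 ≤ 0 := by omega
      have hterm : ∀ i, i ≠ c →
          min ((cs.count i : Int)) (max (d.getD i 0) 0)
            = min (((c :: cs).count i : Int)) (max (d.getD i 0) 0) := by
        intro i hne
        simp [Ne.symm hne]
      by_cases hc : c ∈ cs.toFinset
      · rw [Finset.insert_eq_self.mpr hc]
        rw [← Finset.add_sum_erase _ _ hc, ← Finset.add_sum_erase _ _ hc]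
        have hsum : ∑ i ∈ cs.toFinset.erase c,
            min ((cs.count i : Int)) (max (d.getD i 0) 0)
          = ∑ i ∈ cs.toFinset.erase c,
            min (((c :: cs).count i : Int)) (max (d.getD i 0) 0) := by
          apply Finset.sum_congr rfl
          intro i hi
          exact hterm i (Finset.ne_of_mem_erase hi)
        rw [hsum]
        have h1 : min ((cs.count c : Int)) (max (d.getD c 0) 0) = 0 := by
          have : (0:Int) ≤ (cs.count c : Int) := Int.natCast_nonneg _
          omega
        have h2 : min (((c :: cs).count c : Int)) (max (d.getD c 0) 0) = 0 := by
          have : (0:Int) ≤ ((c :: cs).count c : Int) := Int.natCast_nonneg _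
          omega
        omega
      · rw [Finset.sum_insert hc]
        have hsum : ∑ i ∈ cs.toFinset,
            min ((cs.count i : Int)) (max (d.getD i 0) 0)
          = ∑ i ∈ cs.toFinset,
            min (((c :: cs).count i : Int)) (max (d.getD i 0) 0) := by
          apply Finset.sum_congr rfl
          intro i hi
          exact hterm i (fun h => hc (h ▸ hi))
        rw [hsum]
        have h2 : min (((c :: cs).count c : Int)) (max (d.getD c 0) 0) = 0 := by
          have : (0:Int) ≤ ((c :: cs).count c : Int) := Int.natCast_nonneg _
          omega
        omega

lemma pv_alt_eq (s1 s2 : String) :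
    solution_alt s1 s2
      = ∑ i ∈ s1.toList.toFinset,
          min ((s1.toList.count i : Int)) ((s2.toList.count i : Int)) := by
  unfold solution_alt
  rw [PySem.Dict.foldl_insert_getD_add_one_eq_counter]
  rw [pv_alt_fold]
  rw [zero_add]
  apply Finset.sum_congr rfl
  intro i _
  rw [PySem.Dict.getD_counter]
  have : (0:Int) ≤ (s2.toList.count i : Int) := Int.natCast_nonneg _
  omega

-- ===== VERDICT (by name: the statement is the Claim_ definition above) =====
theorem solution_spec : Claim_equal_solution := by
  intro s1 s2 _
  unfold Spec_solution
  rw [pv_solution_eq, pv_alt_eq]
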